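-- pv_equiv track=rewrite | github.com/reboot-protocol/ds2026 | Lab5/lab5.py | array_packer
-- ===== SOURCE A (Python) =====
-- def array_packer(arr,size):
--     arr_size = len(arr)
--
--     mod = arr_size % (size-1)
--
--     ele_size = int(arr_size/(size-1))
--
--     packed_arr = []
--     count = 0
--
--     for i in range(0,size):
--         if i == 0:
--             packed_arr.append(None)
--             continue
--         temp = []
--         for j in range(0,ele_size):
--             data = arr[count]
--             temp.append(data)
--             count = count +1
--         if mod > 0 :
--             data = arr[count]
--             temp.append(data)
--             count = count + 1
--             mod = mod -1
--
--         packed_arr.append(temp)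
--
--     return packed_arr
-- ===== SOURCE B (Python) =====
-- def array_packer(arr, size):
--     if size <= 0:
--         return []
--     q, r = divmod(len(arr), size - 1)  # ZeroDivisionError at size == 1, as in the original
--     plan = [q + 1] * r + [q] * (size - 1 - r)
--     packed = [None]
--     offset = 0
--     for sz in plan:
--         packed.append(arr[offset:offset + sz])
--         offset += sz
--     return packed
-- ===== Notes on version B (the rewrite author's own statement) =====
-- stated objective: faster
-- what changed: Replaces the element-by-element copy with count/mod bookkeeping by a precomputed per-chunk size plan ([q+1]*r ++ [q]*(k-r)) and list slicing at cumulative offsets.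
import Mathlib
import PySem

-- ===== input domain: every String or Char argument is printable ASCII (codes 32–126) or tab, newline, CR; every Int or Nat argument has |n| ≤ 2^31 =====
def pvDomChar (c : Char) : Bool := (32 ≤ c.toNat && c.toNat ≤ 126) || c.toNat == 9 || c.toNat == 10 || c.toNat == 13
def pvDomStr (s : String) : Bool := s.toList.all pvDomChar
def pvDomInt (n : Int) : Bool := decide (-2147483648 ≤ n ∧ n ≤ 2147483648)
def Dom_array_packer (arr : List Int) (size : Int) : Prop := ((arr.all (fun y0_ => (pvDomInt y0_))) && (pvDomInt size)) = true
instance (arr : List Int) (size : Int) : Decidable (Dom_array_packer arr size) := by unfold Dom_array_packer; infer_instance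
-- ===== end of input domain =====

-- B replaces A's element-by-element count/mod bookkeeping by a precomputed chunk-size plan and slicing (constant-factor speedup, measured).

-- ===== PORT A =====
-- the body of A's outer `for i in range(0,size)` loop; state = (packed_arr, count, mod)
def aChunk (arr : List Int) (ele : Int) (st : List (Option (List Int)) × Int × Int) (i : Int) :
    List (Option (List Int)) × Int × Int :=
  if i = 0 then (st.1 ++ [none], st.2.1, st.2.2)
  else
    -- inner `for j in range(0,ele_size)` building temp; arr[count] is in range whenever A returns (IndexError cannot occur)
    let p := (PySem.List.pyRange 0 ele).foldl
      (fun (s : List Int × Int) _ => (s.1 ++ [PySem.List.pyGetD arr s.2 0], s.2 + 1)) ([], st.2.1)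
    if 0 < st.2.2 then
      (st.1 ++ [some (p.1 ++ [PySem.List.pyGetD arr p.2 0])], p.2 + 1, st.2.2 - 1)
    else (st.1 ++ [some p.1], p.2, st.2.2)

def array_packer (arr : List Int) (size : Int) : List (Option (List Int)) :=
  let arr_size : Int := arr.length
  let md := PySem.Int.mod arr_size (size - 1)
  -- int(arr_size/(size-1)): arr_size ≥ 0 and the loop only runs for size-1 > 0, where float truncation = floor division
  let ele := PySem.Int.floordiv arr_size (size - 1)
  ((PySem.List.pyRange 0 size).foldl (aChunk arr ele) ([], 0, md)).1

-- ===== PORT B =====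
def bStep (arr : List Int) (st : List (Option (List Int)) × Int) (sz : Int) :
    List (Option (List Int)) × Int :=
  (st.1 ++ [some (PySem.List.slice arr (some st.2) (some (st.2 + sz)))], st.2 + sz)

def array_packer_alt (arr : List Int) (size : Int) : List (Option (List Int)) :=
  if size ≤ 0 then []
  else
    let n : Int := arr.length
    let q := PySem.Int.floordiv n (size - 1)
    let r := PySem.Int.mod n (size - 1)
    let plan := List.replicate r.toNat (q + 1) ++ List.replicate (size - 1 - r).toNat q
    (plan.foldl (bStep arr) ([none], 0)).1

-- ===== PRECONDITION & SPEC =====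
-- size = 1 raises ZeroDivisionError in A (and in B); it is the only input where A does not return.
def Pre_array_packer (arr : List Int) (size : Int) : Prop := size ≠ 1
instance (arr : List Int) (size : Int) : Decidable (Pre_array_packer arr size) := by unfold Pre_array_packer; infer_instance
def pvWitness_array_packer : List Int × Int := ([1, 2, 3, 4, 5], 3)

def Spec_array_packer (arr : List Int) (size : Int) (out : List (Option (List Int))) : Prop := out = array_packer_alt arr size
instance (arr : List Int) (size : Int) (out : List (Option (List Int))) : Decidable (Spec_array_packer arr size out) := by unfold Spec_array_packer; infer_instance

-- ===== CLAIM (what is proved, stated in full; the proofs are below) =====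
def Claim_equal_array_packer : Prop := ∀ (arr : List Int) (size : Int), Dom_array_packer arr size → Pre_array_packer arr size → Spec_array_packer arr size (array_packer arr size)

-- ===== LEMMAS AND PROOFS =====

-- common description of the chunk sequence: t chunks, reading offset c, md chunks of size q+1 still owed
def chunksGo (arr : List Int) (q : Nat) : Nat → Nat → Nat → List (Option (List Int))
  | 0, _, _ => []
  | t+1, c, md =>
    if 0 < md then some ((arr.drop c).take (q+1)) :: chunksGo arr q t (c+q+1) (md-1)
    else some ((arr.drop c).take q) :: chunksGo arr q t (c+q) md

lemma getD_at (arr : List Int) (c m : Nat) (hlt : c + m < arr.length) :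
    PySem.List.pyGetD arr ((c + m : Nat) : Int) 0 = arr[c + m] := by
  rw [PySem.List.pyGetD_eq_getElem arr 0 (by positivity) (by exact_mod_cast hlt)]
  simp only [Int.toNat_natCast]

lemma take_snoc (arr : List Int) (c m : Nat) (hlt : c + m < arr.length) :
    (arr.drop c).take m ++ [arr[c + m]] = (arr.drop c).take (m + 1) := by
  rw [List.take_succ]
  congr 1
  have hm' : m < (arr.drop c).length := by simp [List.length_drop]; omega
  rw [List.getElem?_eq_getElem hm']
  simp [List.getElem_drop]

lemma inner_fold (arr : List Int) (acc : List Int) (m c : Nat) (h : c + m ≤ arr.length) :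
    (PySem.List.pyRange 0 (m : Int)).foldl
      (fun (s : List Int × Int) _ => (s.1 ++ [PySem.List.pyGetD arr s.2 0], s.2 + 1)) (acc, (c : Int))
    = (acc ++ (arr.drop c).take m, ((c + m : Nat) : Int)) := by
  induction m with
  | zero => simp [PySem.List.pyRange]
  | succ m ih =>
    have hm : c + m ≤ arr.length := by omega
    have hrange : PySem.List.pyRange 0 ((m : Int) + 1) = PySem.List.pyRange 0 (m : Int) ++ [(m : Int)] :=
      PySem.List.pyRange_one_succ_right (by positivity)
    have hcast : ((m : Int) + 1) = (((m + 1 : Nat)) : Int) := by push_cast; ring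
    rw [← hcast, hrange, List.foldl_append, ih hm]
    have hlt : c + m < arr.length := by omega
    simp only [List.foldl_cons, List.foldl_nil, getD_at arr c m hlt]
    refine Prod.ext ?_ ?_
    · simp [take_snoc arr c m hlt]
    · simp only
      push_cast
      ring

lemma aChunk_zero (arr : List Int) (q c : Nat) (acc : List (Option (List Int))) (x : Int)
    (hx : x ≠ 0) (hcq : c + q ≤ arr.length) :
    aChunk arr (q : Int) (acc, (c : Int), ((0 : Nat) : Int)) x
    = (acc ++ [some ((arr.drop c).take q)], ((c + q : Nat) : Int), ((0 : Nat) : Int)) := by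
  unfold aChunk
  simp only [hx, if_false]
  rw [inner_fold arr [] q c hcq]
  simp

lemma aChunk_pos (arr : List Int) (q c m : Nat) (acc : List (Option (List Int))) (x : Int)
    (hx : x ≠ 0) (hcq : c + q < arr.length) (hm : 0 < m) :
    aChunk arr (q : Int) (acc, (c : Int), ((m : Nat) : Int)) x
    = (acc ++ [some ((arr.drop c).take (q + 1))], ((c + q + 1 : Nat) : Int), ((m - 1 : Nat) : Int)) := by
  unfold aChunk
  simp only [hx, if_false]
  rw [inner_fold arr [] q c (le_of_lt hcq)]
  have hmd : (0 : Int) < (m : Int) := by exact_mod_cast hm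
  simp only [hmd, if_pos, getD_at arr c q hcq]
  refine Prod.ext ?_ ?_
  · simp [take_snoc arr c q hcq]
  · refine Prod.ext ?_ ?_
    · simp only
      push_cast
      ring
    · simp only
      have h1 : 1 ≤ m := hm
      push_cast [h1]
      ring

lemma a_fold (arr : List Int) (q : Nat) (L : List Int) :
    ∀ (acc : List (Option (List Int))) (c m : Nat),
    (∀ x ∈ L, x ≠ 0) → m ≤ L.length → c + L.length * q + m ≤ arr.length →
    L.foldl (aChunk arr (q : Int)) (acc, (c : Int), (m : Int))
    = (acc ++ chunksGo arr q L.length c m, ((c + L.length * q + m : Nat) : Int), 0) := by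
  induction L with
  | nil =>
    intro acc c m _ hm _
    have hm0 : m = 0 := by simpa using hm
    subst hm0
    simp [chunksGo]
  | cons x L ih =>
    intro acc c m hne hm hlen
    have hx : x ≠ 0 := hne x (List.mem_cons_self ..)
    have hlen' : c + (L.length * q + q) + m ≤ arr.length := by
      simp only [List.length_cons, add_mul, one_mul] at hlen
      omega
    rw [List.foldl_cons]
    by_cases hmz : 0 < m
    · obtain ⟨m', rfl⟩ : ∃ m', m = m' + 1 := ⟨m - 1, by omega⟩
      have hlt : c + q < arr.length := by omega
      rw [aChunk_pos arr q c (m' + 1) acc x hx hlt (Nat.succ_pos m')]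
      rw [show m' + 1 - 1 = m' from by omega]
      rw [ih (acc ++ [some ((arr.drop c).take (q + 1))]) (c + q + 1) m'
        (fun y hy => hne y (List.mem_cons_of_mem _ hy))
        (by simp only [List.length_cons] at hm; omega)
        (by omega)]
      have hchunks : chunksGo arr q (x :: L).length c (m' + 1)
          = some ((arr.drop c).take (q + 1)) :: chunksGo arr q L.length (c + q + 1) m' := by
        simp only [List.length_cons]
        rw [chunksGo]
        simp
      rw [hchunks]
      refine Prod.ext (by simp) ?_
      refine Prod.ext ?_ rfl
      simp only [List.length_cons, add_mul, one_mul]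
      congr 1
      omega
    · have hm0 : m = 0 := by omega
      subst hm0
      have hcq : c + q ≤ arr.length := by omega
      rw [aChunk_zero arr q c acc x hx hcq]
      rw [ih (acc ++ [some ((arr.drop c).take q)]) (c + q) 0
        (fun y hy => hne y (List.mem_cons_of_mem _ hy))
        (by omega)
        (by omega)]
      have hchunks : chunksGo arr q (x :: L).length c 0
          = some ((arr.drop c).take q) :: chunksGo arr q L.length (c + q) 0 := by
        simp only [List.length_cons]
        rw [chunksGo]
        simp
      rw [hchunks]
      refine Prod.ext (by simp) ?_
      refine Prod.ext ?_ rfl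
      simp only [List.length_cons]
      congr 1
      simp only [add_mul, one_mul]
      omega

lemma bStep_q (arr : List Int) (q c : Nat) (acc : List (Option (List Int))) :
    bStep arr (acc, (c : Int)) (q : Int)
    = (acc ++ [some ((arr.drop c).take q)], ((c + q : Nat) : Int)) := by
  unfold bStep
  rw [PySem.List.slice_natCast_add]
  refine Prod.ext rfl ?_
  push_cast
  ring

lemma bStep_q1 (arr : List Int) (q c : Nat) (acc : List (Option (List Int))) :
    bStep arr (acc, (c : Int)) ((q : Int) + 1)
    = (acc ++ [some ((arr.drop c).take (q + 1))], ((c + q + 1 : Nat) : Int)) := by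
  unfold bStep
  rw [show (q : Int) + 1 = ((q + 1 : Nat) : Int) by push_cast; ring, PySem.List.slice_natCast_add]
  refine Prod.ext rfl ?_
  push_cast
  ring

lemma b_fold (arr : List Int) (q : Nat) :
    ∀ (m t : Nat) (acc : List (Option (List Int))) (c : Nat),
    (List.replicate m ((q : Int) + 1) ++ List.replicate t (q : Int)).foldl (bStep arr) (acc, (c : Int))
    = (acc ++ chunksGo arr q (m + t) c m, ((c + m * (q + 1) + t * q : Nat) : Int)) := by
  intro m
  induction m with
  | zero =>
    intro t
    induction t with
    | zero => intro acc c; simp [chunksGo]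
    | succ t iht =>
      intro acc c
      simp only [List.replicate_zero, List.replicate_succ, List.nil_append, List.foldl_cons] at iht ⊢
      rw [bStep_q arr q c acc, iht (acc ++ [some ((arr.drop c).take q)]) (c + q)]
      have hchunks : chunksGo arr q (0 + (t + 1)) c 0
          = some ((arr.drop c).take q) :: chunksGo arr q (0 + t) (c + q) 0 := by
        simp only [Nat.zero_add]
        rw [chunksGo]
        simp
      rw [hchunks]
      refine Prod.ext (by simp) ?_
      simp only
      congr 1
      ring
  | succ m ihm =>
    intro t acc c
    simp only [List.replicate_succ, List.cons_append, List.foldl_cons]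
    rw [bStep_q1 arr q c acc, ihm t (acc ++ [some ((arr.drop c).take (q + 1))]) (c + q + 1)]
    have hchunks : chunksGo arr q (m + 1 + t) c (m + 1)
        = some ((arr.drop c).take (q + 1)) :: chunksGo arr q (m + t) (c + q + 1) m := by
      have h2 : m + 1 + t = (m + t) + 1 := by ring
      rw [h2, chunksGo]
      simp
    rw [hchunks]
    refine Prod.ext (by simp) ?_
    simp only
    congr 1
    ring

-- ===== VERDICT (by name: the statement is the Claim_ definition above) =====
theorem array_packer_spec : Claim_equal_array_packer := by
  intro arr size _ hpre
  unfold Spec_array_packer array_packer array_packer_alt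
  by_cases hsz : size ≤ 0
  · have hr : PySem.List.pyRange 0 size = [] := by
      simp [PySem.List.pyRange, hsz]
    simp [hr, hsz]
  · -- size ≥ 2 (size = 1 excluded by Pre_)
    have hsz2 : 2 ≤ size := by
      unfold Pre_array_packer at hpre
      omega
    set k : Nat := (size - 1).toNat with hk
    have hk1 : 1 ≤ k := by omega
    have hkeq : size - 1 = (k : Int) := by omega
    set n : Nat := arr.length with hn
    have hmod : PySem.Int.mod (n : Int) (size - 1) = ((n % k : Nat) : Int) := by
      rw [hkeq]; exact PySem.Int.mod_natCast n k
    have hdiv : PySem.Int.floordiv (n : Int) (size - 1) = ((n / k : Nat) : Int) := by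
      rw [hkeq]; exact PySem.Int.floordiv_natCast n k
    simp only [hmod, hdiv, if_neg hsz]
    -- A side
    have hcons : PySem.List.pyRange 0 size = 0 :: PySem.List.pyRange 1 size := by
      have := PySem.List.pyRange_one_cons (a := 0) (b := size) (by omega)
      simpa using this
    rw [hcons, List.foldl_cons]
    have hstep0 : aChunk arr ((n / k : Nat) : Int) ([], 0, ((n % k : Nat) : Int)) 0
        = ([none], 0, ((n % k : Nat) : Int)) := by
      unfold aChunk; simp
    rw [hstep0]
    have hlenL : (PySem.List.pyRange 1 size).length = k := by
      simp [PySem.List.length_pyRange_one, hk]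
    have hne : ∀ x ∈ PySem.List.pyRange 1 size, x ≠ 0 := by
      intro x hx
      have := PySem.List.mem_pyRange_one.mp hx
      omega
    have hmle : n % k ≤ (PySem.List.pyRange 1 size).length := by
      rw [hlenL]
      exact le_of_lt (Nat.mod_lt n hk1)
    have hsum : 0 + (PySem.List.pyRange 1 size).length * (n / k) + n % k ≤ arr.length := by
      rw [hlenL, ← hn, Nat.zero_add]
      exact Nat.le_of_eq (Nat.div_add_mod n k)
    have hA := a_fold arr (n / k) (PySem.List.pyRange 1 size) [none] 0 (n % k) hne hmle hsum
    simp only [Nat.cast_zero] at hA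
    rw [hA, hlenL]
    -- B side
    have hrt : ((n % k : Nat) : Int).toNat = n % k := by simp only [Int.toNat_natCast]
    have hqt : ((size - 1) - ((n % k : Nat) : Int)).toNat = k - n % k := by
      rw [hkeq]; omega
    rw [hrt, hqt]
    have hB := b_fold arr (n / k) (n % k) (k - n % k) [none] 0
    simp only [Nat.cast_zero] at hB
    rw [hB]
    have : n % k + (k - n % k) = k := by
      have := Nat.mod_lt n hk1; omega
    rw [this]
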